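-- pv_equiv track=rewrite | github.com/HEP-KBFI/tth-htt | scripts/find_samples.py | get_data_golden
-- ===== SOURCE A (Python) =====
-- import collections
-- import itertools
--
-- def split_into_ranges(flat_list):
--   # The input is a list of numbers, e.g. [4, 5, 6, 10, 11, 13, 14, 15]
--   # which is split into lists that represent sub-ranges, which in our example should be
--   # [[4, 6], [10, 11], [13, 14, 15]]
--   # Notice that we assume that the endpoints of both ranges are included (which I hope is the case
--   # in the gloden JSON files)
--
--   # First, let's find at which points in the list the sequentiality is broken
--   # In our example, the program below should return [2, 4], b/c the 3rd and 4th (5th and 6th)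
--   # element in the list differ by more than one
--   split_indices = [ i for i in range(len(flat_list) - 1) if flat_list[i + 1] != flat_list[i] + 1 ]
--
--   # No let's construct the sub-range format by going through the break points one-by-one:
--   # prev_idx = 0, curr_idx = 2,
--   # prev_idx = 3, curr_idx = 4
--   prev_idx = 0
--   split_ranges = []
--   for curr_idx in split_indices:
--     split_ranges.append([flat_list[prev_idx],flat_list[curr_idx]])
--     prev_idx = curr_idx + 1
--   # Here we have to consider the final ,,tail'', which spans the index range 5..7 (included)
--   # Notice that if the input list is fully sequential, the split_ranges variable remains empty,
--   # and prev_idx remains 0, which means that the full range is concentrated into a single range here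
--   split_ranges.append([flat_list[prev_idx],flat_list[len(flat_list) - 1]])
--
--   # Make sure that we can recover the full flat input list from split_ranges
--   # (cf. get_golden_runlumi for more)
--   flat_list_to_test = list(itertools.chain(
--     *[list(range(split_range[0], split_range[1] + 1)) for split_range in split_ranges]
--   ))
--   if flat_list_to_test != flat_list:
--     assert(0)
--
--   return split_ranges
--
-- def get_data_golden(runlumi_data, golden_runlumi):
--   data_runs   = set(runlumi_data.keys())
--   golden_runs = set(golden_runlumi.keys())
--   common_runs = list(sorted(list(data_runs & golden_runs)))
--
--   # We want to check the intersection of each individual common run, because it might be the case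
--   # that the first or last run do not have any common luminosity blocks and is therefore not
--   # part of the golden run. For instance, if a common run, say 304199 has golden range of [10, 18]
--   # and the PD also contains run 304199 but only the luminosity blocks [2, 5], then this run should
--   # be excluded from the golden runs since there's no overlap in their luminosity range.
--   # If such runs happen to be first and/or last in the common runs, then the golden run range will
--   # be different from the case where we only find the common run ranges.
--   golden_data_runs = collections.OrderedDict()
--   for run in common_runs:
--     lumi_range_intersection = list(sorted(list(set(runlumi_data[run]) & set(golden_runlumi[run]))))
--     if lumi_range_intersection:
--       golden_data_runs[run] = split_into_ranges(lumi_range_intersection)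
--   return golden_data_runs
-- ===== SOURCE B (Python) =====
-- import collections
--
-- def get_data_golden(runlumi_data, golden_runlumi):
--   golden_data_runs = collections.OrderedDict()
--   for run in sorted(set(runlumi_data) & set(golden_runlumi)):
--     lumis = sorted(set(runlumi_data[run]) & set(golden_runlumi[run]))
--     if not lumis:
--       continue
--     # single forward pass: emit [start, prev] whenever the sequence breaks
--     ranges = []
--     start = prev = lumis[0]
--     for v in lumis[1:]:
--       if v != prev + 1:
--         ranges.append([start, prev])
--         start = v
--       prev = v
--     ranges.append([start, prev])
--     golden_data_runs[run] = ranges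
--   return golden_data_runs
-- ===== Notes on version B (the rewrite author's own statement) =====
-- stated objective: simpler
-- what changed: The range splitting is a single forward pass (track start/prev, emit [start, prev] at each break) instead of A's two-phase scheme that first collects break indices, then rebuilds ranges from them, then reconstructs and asserts the flat list.
import Mathlib
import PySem

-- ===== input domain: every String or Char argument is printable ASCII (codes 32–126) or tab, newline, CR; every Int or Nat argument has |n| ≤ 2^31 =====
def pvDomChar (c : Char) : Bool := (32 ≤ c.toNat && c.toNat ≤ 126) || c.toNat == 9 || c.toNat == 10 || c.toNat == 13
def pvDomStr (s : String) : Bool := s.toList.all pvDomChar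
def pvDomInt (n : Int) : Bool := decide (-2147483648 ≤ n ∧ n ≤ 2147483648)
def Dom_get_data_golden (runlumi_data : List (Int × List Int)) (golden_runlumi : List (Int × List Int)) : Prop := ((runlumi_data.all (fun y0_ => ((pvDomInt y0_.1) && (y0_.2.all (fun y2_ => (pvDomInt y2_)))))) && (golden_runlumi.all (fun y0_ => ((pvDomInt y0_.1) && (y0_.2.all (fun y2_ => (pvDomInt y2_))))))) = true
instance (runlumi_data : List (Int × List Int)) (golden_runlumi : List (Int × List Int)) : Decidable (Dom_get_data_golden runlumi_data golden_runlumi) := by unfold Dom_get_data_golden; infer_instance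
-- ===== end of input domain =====

-- B replaces A's two-phase range splitting (break indices, then rebuild, then an assert-checked
-- reconstruction) by a single forward pass; the outer run intersection is unchanged.

-- ===== PORT A =====
-- split_into_ranges, phase 1: the list of break indices.
-- (all indices used below are in range for the nonempty lists get_data_golden passes in, so getD is exact)
def pvSplitIndices (l : List Int) : List Nat :=
  (List.range (l.length - 1)).filter (fun i => decide (l.getD (i+1) 0 ≠ l.getD i 0 + 1))

-- split_into_ranges, phase 2: one step of the loop over the break indices (state = (prev_idx, split_ranges))
def pvSplitStep (l : List Int) (st : Nat × List (List Int)) (ci : Nat) : Nat × List (List Int) :=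
  (ci + 1, st.2 ++ [[l.getD st.1 0, l.getD ci 0]])

def split_into_ranges (l : List Int) : List (List Int) :=
  let st := (pvSplitIndices l).foldl (pvSplitStep l) (0, [])
  st.2 ++ [[l.getD st.1 0, l.getD (l.length - 1) 0]]
-- (the Python then reconstructs the flat list from the ranges and asserts it back; on the sorted
-- strictly-increasing nonempty lists get_data_golden feeds it, that assert never fires and the
-- reconstruction contributes nothing to the returned value)

def get_data_golden (runlumi_data : List (Int × List Int)) (golden_runlumi : List (Int × List Int)) : List (Int × List (List Int)) :=
  let data := PySem.Dict.ofList runlumi_data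
  let golden := PySem.Dict.ofList golden_runlumi
  let common_runs := PySem.List.sorted (PySem.Set.inter (PySem.Set.ofList data.keys) (PySem.Set.ofList golden.keys)) (fun x => x) false
  (common_runs.foldl (fun d run =>
      let inter := PySem.List.sorted (PySem.Set.inter (PySem.Set.ofList (data.getD run [])) (PySem.Set.ofList (golden.getD run []))) (fun x => x) false
      if inter ≠ [] then d.insert run (split_into_ranges inter) else d)
    PySem.Dict.empty).items

-- ===== PORT B =====
-- B's single forward pass over lumis[1:], state = (start, prev, ranges-so-far)
def pvRangesLoop (rest : List Int) (start prev : Int) (acc : List (List Int)) : List (List Int) :=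
  match rest with
  | [] => acc ++ [[start, prev]]
  | v :: t => if v ≠ prev + 1 then pvRangesLoop t v v (acc ++ [[start, prev]]) else pvRangesLoop t start v acc

def get_data_golden_alt (runlumi_data : List (Int × List Int)) (golden_runlumi : List (Int × List Int)) : List (Int × List (List Int)) :=
  let data := PySem.Dict.ofList runlumi_data
  let golden := PySem.Dict.ofList golden_runlumi
  let common_runs := PySem.List.sorted (PySem.Set.inter (PySem.Set.ofList data.keys) (PySem.Set.ofList golden.keys)) (fun x => x) false
  (common_runs.foldl (fun d run =>
      let lumis := PySem.List.sorted (PySem.Set.inter (PySem.Set.ofList (data.getD run [])) (PySem.Set.ofList (golden.getD run []))) (fun x => x) false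
      match lumis with
      | [] => d
      | x :: rest => d.insert run (pvRangesLoop rest x x []))
    PySem.Dict.empty).items

-- ===== PRECONDITION & SPEC =====
def Spec_get_data_golden (runlumi_data : List (Int × List Int)) (golden_runlumi : List (Int × List Int)) (out : List (Int × List (List Int))) : Prop := out = get_data_golden_alt runlumi_data golden_runlumi
instance (runlumi_data : List (Int × List Int)) (golden_runlumi : List (Int × List Int)) (out : List (Int × List (List Int))) : Decidable (Spec_get_data_golden runlumi_data golden_runlumi out) := by unfold Spec_get_data_golden; infer_instance

-- ===== CLAIM (what is proved, stated in full; the proofs are below) =====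
def Claim_equal_get_data_golden : Prop := ∀ (runlumi_data : List (Int × List Int)) (golden_runlumi : List (Int × List Int)), Dom_get_data_golden runlumi_data golden_runlumi → Spec_get_data_golden runlumi_data golden_runlumi (get_data_golden runlumi_data golden_runlumi)

-- ===== LEMMAS AND PROOFS =====

-- recursive (non-accumulator) form of B's pass
def pvGo (s p : Int) : List Int → List (List Int)
  | [] => [[s, p]]
  | v :: t => if v = p + 1 then pvGo s v t else [s, p] :: pvGo v v t

theorem pvRangesLoop_eq (t : List Int) : ∀ (s p : Int) (acc : List (List Int)),
    pvRangesLoop t s p acc = acc ++ pvGo s p t := by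
  induction t with
  | nil => intro s p acc; simp [pvRangesLoop, pvGo]
  | cons v t ih =>
    intro s p acc
    by_cases h : v = p + 1 <;> simp [pvRangesLoop, pvGo, h, ih]

-- pvGo's first range depends on s only through its start
theorem pvGo_first (t : List Int) : ∀ p : Int, ∃ e rest, ∀ s : Int, pvGo s p t = [s, e] :: rest := by
  induction t with
  | nil => intro p; exact ⟨p, [], fun s => rfl⟩
  | cons v t ih =>
    intro p
    by_cases h : v = p + 1
    · obtain ⟨e, rest, hr⟩ := ih v
      exact ⟨e, rest, fun s => by simp only [pvGo, if_pos h]; exact h ▸ hr s⟩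
    · exact ⟨p, pvGo v v t, fun s => by simp [pvGo, h]⟩

theorem foldl_step_acc (idxs : List Nat) (l : List Int) : ∀ (p : Nat) (acc : List (List Int)),
    idxs.foldl (pvSplitStep l) (p, acc)
      = ((idxs.foldl (pvSplitStep l) (p, [])).1, acc ++ (idxs.foldl (pvSplitStep l) (p, [])).2) := by
  induction idxs with
  | nil => intro p acc; simp
  | cons c rest ih =>
    intro p acc
    simp only [List.foldl_cons, pvSplitStep]
    rw [ih (c+1) (acc ++ _), ih (c+1) ([] ++ _)]
    simp

theorem foldl_step_shift (idxs : List Nat) (x : Int) (l : List Int) : ∀ (p : Nat) (acc : List (List Int)),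
    (idxs.map (· + 1)).foldl (pvSplitStep (x :: l)) (p + 1, acc)
      = ((idxs.foldl (pvSplitStep l) (p, acc)).1 + 1, (idxs.foldl (pvSplitStep l) (p, acc)).2) := by
  induction idxs with
  | nil => intro p acc; simp
  | cons c rest ih =>
    intro p acc
    simp only [List.map_cons, List.foldl_cons, pvSplitStep, List.getD_cons_succ]
    exact ih (c + 1) _

theorem pvSplitIndices_cons (x y : Int) (t : List Int) :
    pvSplitIndices (x :: y :: t)
      = (if y ≠ x + 1 then [0] else []) ++ (pvSplitIndices (y :: t)).map (· + 1) := by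
  simp only [pvSplitIndices, List.length_cons, Nat.add_sub_cancel, List.range_succ_eq_map,
    List.filter_cons, List.filter_map, List.getD_cons_succ, List.getD_cons_zero]
  by_cases h : y = x + 1 <;>
    simp [h, Function.comp_def] <;>
    exact List.map_congr_left fun a _ => rfl

theorem split_eq_pvGo (l : List Int) : ∀ x : Int, split_into_ranges (x :: l) = pvGo x x l := by
  induction l with
  | nil => intro x; simp [split_into_ranges, pvSplitIndices, pvGo]
  | cons y t ih =>
    intro x
    have hfirst := pvGo_first t y
    obtain ⟨e, rest, hr⟩ := hfirst
    have hIH : split_into_ranges (y :: t) = pvGo y y t := ih y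
    rw [hr y] at hIH
    by_cases h : y = x + 1
    · -- no break at index 0
      have hsi : pvSplitIndices (x :: y :: t) = (pvSplitIndices (y :: t)).map (· + 1) := by
        rw [pvSplitIndices_cons]; simp [h]
      have hgoal : split_into_ranges (x :: y :: t) = [x, e] :: rest := by
        cases hI : pvSplitIndices (y :: t) with
        | nil =>
          have : split_into_ranges (y :: t) = [[y, (y :: t).getD ((y :: t).length - 1) 0]] := by
            simp [split_into_ranges, hI]
          rw [hIH] at this
          simp only [split_into_ranges, hsi, hI, List.map_nil, List.foldl_nil]
          simp only [List.cons.injEq, true_and, and_true] at this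
          obtain ⟨he, hrest⟩ := this
          simp only [List.length_cons, List.getD_cons_zero, Nat.add_sub_cancel,
            List.getD_cons_succ, hrest]
          rw [he]
          simp
        | cons c idxs =>
          -- first step of the fold, then the shift/acc lemmas
          simp only [split_into_ranges, hsi, hI, List.map_cons, List.foldl_cons, pvSplitStep,
            List.getD_cons_zero, List.getD_cons_succ, List.nil_append]
          rw [foldl_step_shift idxs x (y :: t) (c + 1), foldl_step_acc idxs (y :: t) (c + 1)]
          have hB : split_into_ranges (y :: t)
              = [[y, (y :: t).getD c 0]] ++ (idxs.foldl (pvSplitStep (y :: t)) (c + 1, [])).2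
                ++ [[(y :: t).getD ((idxs.foldl (pvSplitStep (y :: t)) (c + 1, [])).1) 0,
                     (y :: t).getD ((y :: t).length - 1) 0]] := by
            simp only [split_into_ranges, hI, List.foldl_cons, pvSplitStep, List.getD_cons_zero,
              List.nil_append]
            rw [foldl_step_acc idxs (y :: t) (c + 1)]
          rw [hIH] at hB
          -- hB : [y,e] :: rest = [[y, _]] ++ T ++ [tail]
          simp only [List.cons_append, List.nil_append, List.cons.injEq, true_and, and_true] at hB
          obtain ⟨he2, hrest2⟩ := hB
          simp only [List.length_cons, Nat.add_sub_cancel, List.getD_cons_succ, hrest2]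
          rw [he2]
          simp
      rw [hgoal]
      have : pvGo x x (y :: t) = pvGo x y t := by simp [pvGo, h]
      rw [this, hr x]
    · -- break at index 0: a singleton range [x, x] is split off
      have hsi : pvSplitIndices (x :: y :: t) = 0 :: (pvSplitIndices (y :: t)).map (· + 1) := by
        rw [pvSplitIndices_cons]; simp [h]
      have hgoal : split_into_ranges (x :: y :: t) = [x, x] :: split_into_ranges (y :: t) := by
        simp only [split_into_ranges, hsi, List.foldl_cons, pvSplitStep, List.getD_cons_zero,
          List.nil_append]
        rw [foldl_step_shift (pvSplitIndices (y :: t)) x (y :: t) 0,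
          foldl_step_acc (pvSplitIndices (y :: t)) (y :: t) 0]
        simp only [List.length_cons, Nat.add_sub_cancel,
          List.getD_cons_succ, List.cons_append, List.nil_append]
      rw [hgoal, hIH]
      simp [pvGo, h, hr y]

theorem ranges_eq (x : Int) (rest : List Int) :
    split_into_ranges (x :: rest) = pvRangesLoop rest x x [] := by
  rw [pvRangesLoop_eq, split_eq_pvGo]; simp

-- ===== VERDICT (by name: the statement is the Claim_ definition above) =====
theorem get_data_golden_spec : Claim_equal_get_data_golden := by
  intro runlumi_data golden_runlumi _
  unfold Spec_get_data_golden get_data_golden get_data_golden_alt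
  dsimp only
  congr 1
  apply List.foldl_ext
  intro d run _
  cases hI : PySem.List.sorted (PySem.Set.inter
      (PySem.Set.ofList ((PySem.Dict.ofList runlumi_data).getD run []))
      (PySem.Set.ofList ((PySem.Dict.ofList golden_runlumi).getD run []))) (fun x => x) false with
  | nil => simp
  | cons x rest => simp [ranges_eq]
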